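-- pv_equiv track=rewrite | github.com/Ga420Low/project-os-core | src/project_os_core/learning/service.py | _tokenize_for_match
-- ===== SOURCE A (Python) =====
-- def _tokenize_for_match(value: str) -> list[str]:
--     if not value:
--         return []
--     raw_tokens = []
--     token_buffer: list[str] = []
--     for character in value:
--         if character.isalnum() or character in ("-", "_", "/"):
--             token_buffer.append(character)
--             continue
--         if token_buffer:
--             raw_tokens.append("".join(token_buffer))
--             token_buffer = []
--     if token_buffer:
--         raw_tokens.append("".join(token_buffer))
--     return [token for token in raw_tokens if len(token) >= 4 or "/" in token or "-" in token]
-- ===== SOURCE B (Python) =====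
-- def _tokenize_for_match(value: str) -> list[str]:
--     out = []
--     n = len(value)
--     i = 0
--     while i < n:
--         c = value[i]
--         if not (c.isalnum() or c in ("-", "_", "/")):
--             i += 1
--             continue
--         j = i + 1
--         while j < n and (value[j].isalnum() or value[j] in ("-", "_", "/")):
--             j += 1
--         token = value[i:j]
--         if len(token) >= 4 or "/" in token or "-" in token:
--             out.append(token)
--         i = j
--     return out
-- ===== Notes on version B (the rewrite author's own statement) =====
-- stated objective: alternative
-- what changed: B replaces A's character-by-character buffer accumulation (append-to-buffer, flush-on-delimiter, final flush) with a two-pointer span scan that slices each maximal run of token characters directly out of the string and filters it on the spot, producing the output in one pass without intermediate buffers or a raw_tokens list.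
import Mathlib
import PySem

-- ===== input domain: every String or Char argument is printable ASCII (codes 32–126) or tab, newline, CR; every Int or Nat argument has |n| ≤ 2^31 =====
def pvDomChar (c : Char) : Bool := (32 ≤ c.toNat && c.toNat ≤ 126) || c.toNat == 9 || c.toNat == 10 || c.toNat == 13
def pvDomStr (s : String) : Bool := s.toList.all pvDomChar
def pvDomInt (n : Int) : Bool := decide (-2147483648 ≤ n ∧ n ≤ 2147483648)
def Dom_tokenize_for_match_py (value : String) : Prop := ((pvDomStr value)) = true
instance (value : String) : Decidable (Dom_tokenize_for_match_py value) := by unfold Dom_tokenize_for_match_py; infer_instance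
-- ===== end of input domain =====

-- B replaces A's buffer-accumulation loop with a two-pointer span scan over maximal
-- runs of token characters (alternative decomposition, same cost); A = B on all inputs.


-- character.isalnum() or character in ("-", "_", "/")   (shared by both Pythons verbatim)
def keepChar (c : Char) : Bool := PySem.Chars.isalnum c || c == '-' || c == '_' || c == '/'

-- len(token) >= 4 or "/" in token or "-" in token   (for a 1-char needle, Python's
-- substring "in" coincides with char membership; shared by both Pythons verbatim)
def keepTok (t : List Char) : Bool := decide (4 ≤ t.length) || t.contains '/' || t.contains '-'

-- ===== PORT A =====
-- loop state: (raw_tokens, token_buffer); ''.join deferred to a final String.ofList (same strings)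
def tokAStep (st : List (List Char) × List Char) (c : Char) : List (List Char) × List Char :=
  if keepChar c then (st.1, st.2 ++ [c])
  else if st.2 ≠ [] then (st.1 ++ [st.2], []) else st

def tokenize_for_match_py (value : String) : List String :=
  if value.toList = [] then []
  else
    let st := value.toList.foldl tokAStep ([], [])
    let raw := if st.2 ≠ [] then st.1 ++ [st.2] else st.1
    (raw.filter keepTok).map String.ofList

-- ===== PORT B =====
-- Source B's two-pointer scan: slice out each maximal run of keepChar characters
-- (takeWhile = the inner j-advancing loop + slice value[i:j]; dropWhile = i = j / skip)
def tokGroups : List Char → List (List Char)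
  | [] => []
  | c :: cs =>
    if keepChar c then (c :: cs.takeWhile keepChar) :: tokGroups (cs.dropWhile keepChar)
    else tokGroups cs
termination_by l => l.length
decreasing_by
  · simpa using Nat.lt_succ_of_le (List.length_dropWhile_le keepChar cs)
  · simp

def tokenize_for_match_py_alt (value : String) : List String :=
  ((tokGroups value.toList).filter keepTok).map String.ofList

-- ===== PRECONDITION & SPEC =====
def Spec_tokenize_for_match_py (value : String) (out : List String) : Prop := out = tokenize_for_match_py_alt value
instance (value : String) (out : List String) : Decidable (Spec_tokenize_for_match_py value out) := by unfold Spec_tokenize_for_match_py; infer_instance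

-- ===== CLAIM (what is proved, stated in full; the proofs are below) =====
def Claim_equal_tokenize_for_match_py : Prop := ∀ (value : String), Dom_tokenize_for_match_py value → Spec_tokenize_for_match_py value (tokenize_for_match_py value)

-- ===== LEMMAS AND PROOFS =====

-- A's loop, reformulated with the pending buffer as an explicit argument
def groupsB (buf : List Char) : List Char → List (List Char)
  | [] => if buf = [] then [] else [buf]
  | c :: cs =>
    if keepChar c then groupsB (buf ++ [c]) cs
    else if buf = [] then groupsB [] cs else buf :: groupsB [] cs

lemma foldl_tokAStep (cs : List Char) :
    ∀ (acc : List (List Char)) (buf : List Char),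
      (let st := cs.foldl tokAStep (acc, buf)
       if st.2 ≠ [] then st.1 ++ [st.2] else st.1) = acc ++ groupsB buf cs := by
  induction cs with
  | nil =>
    intro acc buf
    by_cases h : buf = [] <;> simp [groupsB, h]
  | cons c cs ih =>
    intro acc buf
    simp only [List.foldl_cons, tokAStep, groupsB]
    by_cases hk : keepChar c
    · simpa [hk] using ih acc (buf ++ [c])
    · by_cases hb : buf = []
      · simpa [hk, hb] using ih acc []
      · simpa [hk, hb] using ih (acc ++ [buf]) []

lemma groupsB_eq (cs : List Char) :
    ∀ buf, groupsB buf cs =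
      if buf = [] then tokGroups cs
      else (buf ++ cs.takeWhile keepChar) :: tokGroups (cs.dropWhile keepChar) := by
  induction cs with
  | nil => intro buf; by_cases h : buf = [] <;> simp [groupsB, tokGroups, h]
  | cons c cs ih =>
    intro buf
    by_cases hk : keepChar c
    · by_cases hb : buf = []
      · simp [groupsB, hk, hb, ih, tokGroups]
      · simp [groupsB, hk, hb, ih, tokGroups]
    · by_cases hb : buf = []
      · simp [groupsB, hk, hb, ih, tokGroups]
      · simp [groupsB, hk, hb, ih, tokGroups]

-- ===== VERDICT (by name: the statement is the Claim_ definition above) =====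
theorem tokenize_for_match_py_spec : Claim_equal_tokenize_for_match_py := by
  intro value _
  show tokenize_for_match_py value = tokenize_for_match_py_alt value
  unfold tokenize_for_match_py tokenize_for_match_py_alt
  by_cases h : value.toList = []
  · simp [h, tokGroups]
  · have := foldl_tokAStep value.toList [] []
    simp only [List.nil_append] at this
    simp [h, this, groupsB_eq]
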